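-- pv_equiv track=rewrite | github.com/WhoIsJayD/python-beginner-projects | projects/Password Projects/Password Meter/meter_pass.py | consecutiveUpperCase
-- ===== SOURCE A (Python) =====
-- def consecutiveUpperCase(password):
--     password = f"{password}1"
--
--     countUpperCase = sum(
--         1
--         for i in range(len(password))
--         if password[i].isupper() and password[i + 1].isupper()
--     )
--     return (countUpperCase * 2) * -1
-- ===== SOURCE B (Python) =====
-- def consecutiveUpperCase(password):
--     s = f"{password}"
--     total = 0
--     run = 0
--     for ch in s:
--         if ch.isupper():
--             run += 1
--         else:
--             if run:
--                 total += run - 1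
--             run = 0
--     if run:
--         total += run - 1
--     return total * -2
-- ===== Notes on version B (the rewrite author's own statement) =====
-- stated objective: simpler
-- what changed: Replaces the sentinel-append plus adjacent-index pair scan with a single run-length pass: maximal uppercase runs contribute run-1 pairs each, no sentinel and no indexing.
import Mathlib
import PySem

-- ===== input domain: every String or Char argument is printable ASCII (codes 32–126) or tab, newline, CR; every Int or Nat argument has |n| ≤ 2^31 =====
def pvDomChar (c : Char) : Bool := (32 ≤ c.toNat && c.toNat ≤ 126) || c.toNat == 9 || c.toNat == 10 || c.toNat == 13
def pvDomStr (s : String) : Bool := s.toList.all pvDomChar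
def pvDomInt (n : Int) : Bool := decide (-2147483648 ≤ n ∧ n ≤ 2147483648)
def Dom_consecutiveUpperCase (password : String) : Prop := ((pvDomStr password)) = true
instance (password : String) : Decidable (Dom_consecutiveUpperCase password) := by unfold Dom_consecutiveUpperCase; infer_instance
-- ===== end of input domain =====

-- B replaces the sentinel-append + adjacent-index pair scan with one run-length pass
-- (each maximal uppercase run of length r contributes r-1 pairs); objective: simpler.

-- ===== PORT A =====
-- A-side helper: password[i].isupper() with Python indexing; `none` (IndexError) is read as
-- false, which is exact here because the short-circuiting `and` makes the out-of-range read
-- unreachable in A (the char before it, the sentinel '1', is never uppercase).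
def pvUpAt (s : List Char) (i : Int) : Bool :=
  match PySem.List.pyGet? s i with
  | some c => PySem.Chars.isupper c
  | none => false

def consecutiveUpperCase (password : String) : Int :=
  let s := (password ++ "1").toList
  let countUpperCase : Int :=
    (PySem.List.pyRange 0 (PySem.Chars.len s) 1).foldl
      (fun acc i => if pvUpAt s i && pvUpAt s (i + 1) then acc + 1 else acc) 0
  (countUpperCase * 2) * -1

-- ===== PORT B =====
def consecutiveUpperCase_alt (password : String) : Int :=
  let st := password.toList.foldl
    (fun (st : Int × Int) ch =>
      if PySem.Chars.isupper ch then (st.1, st.2 + 1)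
      else ((if st.2 ≠ 0 then st.1 + (st.2 - 1) else st.1), 0))
    (0, 0)
  let total := if st.2 ≠ 0 then st.1 + (st.2 - 1) else st.1
  total * -2

-- ===== PRECONDITION & SPEC =====
def Spec_consecutiveUpperCase (password : String) (out : Int) : Prop := out = consecutiveUpperCase_alt password
instance (password : String) (out : Int) : Decidable (Spec_consecutiveUpperCase password out) := by unfold Spec_consecutiveUpperCase; infer_instance

-- ===== CLAIM (what is proved, stated in full; the proofs are below) =====
def Claim_equal_consecutiveUpperCase : Prop := ∀ (password : String), Dom_consecutiveUpperCase password → Spec_consecutiveUpperCase password (consecutiveUpperCase password)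

-- ===== LEMMAS AND PROOFS =====

-- adjacent uppercase pair count, the common characterisation
def pvPc : List Char → Int
  | [] => 0
  | [_] => 0
  | a :: b :: t => (if PySem.Chars.isupper a && PySem.Chars.isupper b then 1 else 0) + pvPc (b :: t)

theorem pvUpAt_cons_succ (c : Char) (t : List Char) (k : Nat) :
    pvUpAt (c :: t) ((k : Int) + 1) = pvUpAt t k := by
  simp [pvUpAt, PySem.List.pyGet?_cons_succ]

theorem pvUpAt_cons_of_nonneg (c : Char) (t : List Char) (i : Int) (h : 0 ≤ i) :
    pvUpAt (c :: t) (i + 1) = pvUpAt t i := by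
  lift i to Nat using h
  exact pvUpAt_cons_succ c t i

theorem pvLoopA (s : List Char) (a : Int) :
    (PySem.List.pyRange 0 (PySem.Chars.len s) 1).foldl
      (fun acc i => if pvUpAt s i && pvUpAt s (i + 1) then acc + 1 else acc) a
    = a + pvPc s := by
  induction s generalizing a with
  | nil => simp [PySem.Chars.len_eq, pvPc]
  | cons c t ih =>
    have hshift : PySem.List.pyRange 0 (PySem.Chars.len (c :: t)) 1
        = (0 : Int) :: (PySem.List.pyRange 0 (PySem.Chars.len t) 1).map (· + 1) := by
      have hlen : (PySem.Chars.len (c :: t)).toNat = t.length + 1 := by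
        simp [PySem.Chars.len_eq]
      rw [PySem.List.pyRange_zero, hlen, List.range_succ_eq_map,
        PySem.Chars.len_eq, PySem.List.pyRange_zero_nat]
      simp only [List.map_cons, List.map_map, Function.comp_def, Nat.cast_zero]
      push_cast
      rfl
    rw [hshift]
    rw [List.foldl_cons, List.foldl_map]
    rw [PySem.List.foldl_congr_mem _ _
      (fun acc i => if pvUpAt t i && pvUpAt t (i + 1) then acc + 1 else acc) _
      (by
        intro acc i hi
        have h0 : 0 ≤ i := (PySem.List.mem_pyRange_one.mp hi).1
        rw [pvUpAt_cons_of_nonneg c t i h0,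
            pvUpAt_cons_of_nonneg c t (i + 1) (by omega)])]
    rw [ih]
    -- resolve the first iteration (index 0) against pvPc (c :: t)
    rcases t with _ | ⟨d, t'⟩
    · simp [pvUpAt, pvPc, PySem.List.pyGet?, PySem.List.pyIdx?]
    · have h0 : pvUpAt (c :: d :: t') 0 = PySem.Chars.isupper c := by
        simp [pvUpAt, PySem.List.pyGet?_zero_cons]
      have h1 : pvUpAt (c :: d :: t') (0 + 1) = PySem.Chars.isupper d := by
        simp [pvUpAt, PySem.List.pyGet?, PySem.List.pyIdx?]
      rw [h0, h1]
      simp only [pvPc]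
      split <;> ring

theorem pvPc_append_one (s : List Char) : pvPc (s ++ ['1']) = pvPc s := by
  induction s using pvPc.induct with
  | case1 => simp [pvPc]
  | case2 x => simp [pvPc, show PySem.Chars.isupper '1' = false from rfl]
  | case3 a b t ih =>
    simp only [List.cons_append] at ih ⊢
    rw [pvPc, pvPc]
    rw [ih]

def pvHeadUp : List Char → Int
  | [] => 0
  | c :: _ => if PySem.Chars.isupper c then 1 else 0

theorem pvLoopB (s : List Char) (tot run : Int) (hr : 0 ≤ run) :
    (if (s.foldl
        (fun (st : Int × Int) ch =>
          if PySem.Chars.isupper ch then (st.1, st.2 + 1)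
          else ((if st.2 ≠ 0 then st.1 + (st.2 - 1) else st.1), 0))
        (tot, run)).2 ≠ 0
     then (s.foldl
        (fun (st : Int × Int) ch =>
          if PySem.Chars.isupper ch then (st.1, st.2 + 1)
          else ((if st.2 ≠ 0 then st.1 + (st.2 - 1) else st.1), 0))
        (tot, run)).1 + ((s.foldl
        (fun (st : Int × Int) ch =>
          if PySem.Chars.isupper ch then (st.1, st.2 + 1)
          else ((if st.2 ≠ 0 then st.1 + (st.2 - 1) else st.1), 0))
        (tot, run)).2 - 1)
     else (s.foldl
        (fun (st : Int × Int) ch =>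
          if PySem.Chars.isupper ch then (st.1, st.2 + 1)
          else ((if st.2 ≠ 0 then st.1 + (st.2 - 1) else st.1), 0))
        (tot, run)).1)
    = tot + (if 1 ≤ run then run - 1 + pvHeadUp s else 0) + pvPc s := by
  induction s generalizing tot run with
  | nil =>
    simp only [List.foldl_nil, pvHeadUp, pvPc]
    split_ifs <;> omega
  | cons c t ih =>
    simp only [List.foldl_cons]
    by_cases hc : PySem.Chars.isupper c
    · simp only [hc, if_true]
      rw [ih tot (run + 1) (by omega)]
      rcases t with _ | ⟨d, t'⟩
      · simp only [pvHeadUp, pvPc, hc, if_true]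
        split_ifs <;> omega
      · simp only [pvHeadUp, pvPc, hc, Bool.true_and, if_true]
        split_ifs <;> omega
    · simp only [hc, Bool.false_eq_true, if_false]
      rw [ih _ 0 le_rfl]
      rcases t with _ | ⟨d, t'⟩
      · simp only [pvHeadUp, pvPc, hc, Bool.false_eq_true, if_false]
        norm_num
        split_ifs <;> omega
      · simp only [pvHeadUp, pvPc, hc, Bool.false_and, Bool.false_eq_true, if_false]
        norm_num
        split_ifs <;> omega

-- ===== VERDICT (by name: the statement is the Claim_ definition above) =====
theorem consecutiveUpperCase_spec : Claim_equal_consecutiveUpperCase := by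
  intro password _
  unfold Spec_consecutiveUpperCase consecutiveUpperCase consecutiveUpperCase_alt
  have hA := pvLoopA ((password ++ "1").toList) 0
  have hB := pvLoopB password.toList 0 0 (le_refl 0)
  simp only at hA hB ⊢
  rw [hA, hB]
  have : (password ++ "1").toList = password.toList ++ ['1'] := by
    simp
  rw [this, pvPc_append_one]
  norm_num
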